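-- pv_equiv track=rewrite | github.com/rocky-d/informatics | code/py/src/onlinejudge/leetcode/done/lcp40.py | maxmiumScore
-- ===== SOURCE A (Python) =====
-- from typing import List
--
-- def maxmiumScore(cards: List[int], cnt: int) -> int:
--     ans = 0
--     cards.sort(reverse = True)
--     odds, eves = [], []
--     for card in cards:
--         ls = odds if 0b1 == 0b1 & card else eves
--         ls.append(card)
--     if 0b1 == 0b1 & len(odds):
--         del odds[-1]
--     odds_lst, odds = odds, []
--     for i in range(1, len(odds_lst), 2):
--         odds.append(odds_lst[i - 1] + odds_lst[i])
--     if 0b1 == 0b1 & cnt: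
--         if 0 == len(eves):
--             return 0
--         ans += eves.pop(0)
--         cnt -= 1
--     i, j = 1, 0
--     while 2 <= cnt and j < len(odds) and i < len(eves):
--         if eves[i - 1] + eves[i] <= odds[j]:
--             ans += odds[j]
--             j += 1
--         else:
--             ans += eves[i - 1] + eves[i]
--             i += 2
--         cnt -= 2
--     i -= 1
--     if 0 < cnt:
--         if j == len(odds):
--             if i + cnt <= len(eves):
--                 ans += sum(eves[i:i + cnt])
--                 i += cnt
--                 cnt -= cnt
--             else:
--                 ans = 0
--         else:
--             half = cnt // 2
--             if j + half <= len(odds):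
--                 ans += sum(odds[j:j + half])
--                 j += half
--                 cnt -= cnt
--             else:
--                 ans = 0
--     return ans
-- ===== SOURCE B (Python) =====
-- from typing import List
--
-- def maxmiumScore(cards: List[int], cnt: int) -> int:
--     cards.sort(reverse=True)
--     if cnt < 0:
--         return 0
--     evens = [c for c in cards if c % 2 == 0]
--     odds = [c for c in cards if c % 2 != 0]
--     base = 0
--     if cnt % 2 == 1:
--         if not evens:
--             return 0
--         base = evens[0]
--         evens = evens[1:]
--         cnt -= 1
--     pairs = [evens[k] + evens[k + 1] for k in range(0, len(evens) - 1, 2)]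
--     pairs += [odds[k] + odds[k + 1] for k in range(0, len(odds) - 1, 2)]
--     k = cnt // 2
--     if k > len(pairs):
--         return 0
--     pairs.sort(reverse=True)
--     return base + sum(pairs[:k])
-- ===== Notes on version B (the rewrite author's own statement) =====
-- stated objective: simpler
-- what changed: A's stateful two-pointer greedy merge over even-pair and odd-pair streams plus four post-loop tail branches is replaced by a direct selection: build all adjacent pair sums of the descending evens and odds, sort them once, and sum the top cnt//2 of them (plus the top even when cnt is odd), returning 0 when not enough pairs exist.
-- intended difference: For negative odd cnt on inputs containing an even card, A returns the largest even card (its parity branch pops it before noticing cnt is unsatisfiable) while B returns 0; selecting a negative number of cards is impossible, so 0 — A's own answer for every other impossible request — is the intended value. — e.g. on maxmiumScore([2], -1): A returns 2, B returns 0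
import Mathlib
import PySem

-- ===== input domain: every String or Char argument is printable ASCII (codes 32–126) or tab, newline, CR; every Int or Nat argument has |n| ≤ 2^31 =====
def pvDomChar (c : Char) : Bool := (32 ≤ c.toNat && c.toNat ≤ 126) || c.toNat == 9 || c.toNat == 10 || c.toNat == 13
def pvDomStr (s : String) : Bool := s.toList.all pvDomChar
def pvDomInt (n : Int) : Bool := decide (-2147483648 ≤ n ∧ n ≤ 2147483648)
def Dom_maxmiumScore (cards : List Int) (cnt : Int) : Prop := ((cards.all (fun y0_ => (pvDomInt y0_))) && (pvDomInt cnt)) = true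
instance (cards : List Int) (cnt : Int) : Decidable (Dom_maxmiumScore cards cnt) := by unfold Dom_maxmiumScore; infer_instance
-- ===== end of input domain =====

-- B replaces A's two-pointer greedy merge by one sort of all pair sums and a prefix sum (objective: simpler);
-- both Pythons sort `cards` in place (same mutation); the equivalence proved here is about the return value.

-- ===== PORT A =====
-- A's while-loop: state (ans, i, j, cnt); one iteration per `while` pass
def pvALoop (eves odds : List Int) (ans i j cnt : Int) : Int × Int × Int × Int :=
  if h : 2 ≤ cnt ∧ j < (odds.length : Int) ∧ i < (eves.length : Int) then
    if PySem.List.pyGetD eves (i - 1) 0 + PySem.List.pyGetD eves i 0 ≤ PySem.List.pyGetD odds j 0 then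
      pvALoop eves odds (ans + PySem.List.pyGetD odds j 0) i (j + 1) (cnt - 2)
    else
      pvALoop eves odds (ans + (PySem.List.pyGetD eves (i - 1) 0 + PySem.List.pyGetD eves i 0)) (i + 2) j (cnt - 2)
  else (ans, i, j, cnt)
termination_by cnt.toNat
decreasing_by all_goals omega

-- A's code after the loop: `i -= 1` and the two tail branches
def pvATail (eves odds : List Int) (st : Int × Int × Int × Int) : Int :=
  let ans := st.1
  let i := st.2.1 - 1
  let j := st.2.2.1
  let cnt := st.2.2.2
  if 0 < cnt then
    if j = (odds.length : Int) then
      if i + cnt ≤ (eves.length : Int) then ans + (PySem.List.slice eves (some i) (some (i + cnt))).sum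
      else 0
    else
      let half := PySem.Int.floordiv cnt 2
      if j + half ≤ (odds.length : Int) then ans + (PySem.List.slice odds (some j) (some (j + half))).sum
      else 0
  else ans

def maxmiumScore (cards : List Int) (cnt : Int) : Int :=
  let cs := PySem.List.sorted cards (fun x => x) true
  let oe := cs.foldl (fun (p : List Int × List Int) card =>
      if 1 = PySem.Int.band 1 card then (p.1 ++ [card], p.2) else (p.1, p.2 ++ [card])) ([], [])
  let odds0 := oe.1
  let eves := oe.2
  let odds1 := if 1 = PySem.Int.band 1 (odds0.length : Int) then odds0.dropLast else odds0
  let odds := (PySem.List.pyRange 1 (odds1.length : Int) 2).foldl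
      (fun acc i => acc ++ [PySem.List.pyGetD odds1 (i - 1) 0 + PySem.List.pyGetD odds1 i 0]) []
  if 1 = PySem.Int.band 1 cnt then
    if (eves.length : Int) = 0 then 0
    else pvATail (eves.drop 1) odds (pvALoop (eves.drop 1) odds (0 + PySem.List.pyGetD eves 0 0) 1 0 (cnt - 1))
  else pvATail eves odds (pvALoop eves odds 0 1 0 cnt)

-- ===== PORT B =====
def maxmiumScore_alt (cards : List Int) (cnt : Int) : Int :=
  let cs := PySem.List.sorted cards (fun x => x) true
  if cnt < 0 then 0
  else
    let evens0 := cs.filter (fun c => PySem.Int.mod c 2 = 0)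
    let odds := cs.filter (fun c => ¬ PySem.Int.mod c 2 = 0)
    let st : Option (Int × List Int × Int) :=
      if PySem.Int.mod cnt 2 = 1 then
        if evens0 = [] then none
        else some (PySem.List.pyGetD evens0 0 0, evens0.drop 1, cnt - 1)
      else some (0, evens0, cnt)
    match st with
    | none => 0
    | some (base, evens, cnt1) =>
      let pairs :=
        (PySem.List.pyRange 0 ((evens.length : Int) - 1) 2).map
          (fun k => PySem.List.pyGetD evens k 0 + PySem.List.pyGetD evens (k + 1) 0)
        ++ (PySem.List.pyRange 0 ((odds.length : Int) - 1) 2).map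
          (fun k => PySem.List.pyGetD odds k 0 + PySem.List.pyGetD odds (k + 1) 0)
      let k := PySem.Int.floordiv cnt1 2
      if (pairs.length : Int) < k then 0
      else base + (PySem.List.slice (PySem.List.sorted pairs (fun x => x) true) none (some k)).sum

-- ===== PRECONDITION & SPEC =====
-- For negative odd cnt on inputs with an even card, A returns the largest even card (it pops it before
-- noticing the request is unsatisfiable) while B returns 0, the intended value for an impossible request.
def D_maxmiumScore (cards : List Int) (cnt : Int) : Prop :=
  cnt < 0 ∧ PySem.Int.mod cnt 2 = 1 ∧ ∃ x ∈ cards, PySem.Int.mod x 2 = 0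
instance (cards : List Int) (cnt : Int) : Decidable (D_maxmiumScore cards cnt) := by
  unfold D_maxmiumScore; infer_instance

def Spec_maxmiumScore (cards : List Int) (cnt : Int) (out : Int) : Prop :=
  ¬ D_maxmiumScore cards cnt → out = maxmiumScore_alt cards cnt
instance (cards : List Int) (cnt : Int) (out : Int) : Decidable (Spec_maxmiumScore cards cnt out) := by
  unfold Spec_maxmiumScore; infer_instance

def pvDiffWitness_maxmiumScore : List Int × Int := ([2], -1)
def pvDiffWitnessOut_maxmiumScore : Int × Int := (2, 0)

-- ===== CLAIM (what is proved, stated in full; the proofs are below) =====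
def Claim_unchanged_maxmiumScore : Prop := ∀ (cards : List Int) (cnt : Int), Dom_maxmiumScore cards cnt → Spec_maxmiumScore cards cnt (maxmiumScore cards cnt)
def Claim_changed_maxmiumScore : Prop := Dom_maxmiumScore (pvDiffWitness_maxmiumScore.1) (pvDiffWitness_maxmiumScore.2) ∧ D_maxmiumScore (pvDiffWitness_maxmiumScore.1) (pvDiffWitness_maxmiumScore.2) ∧ maxmiumScore (pvDiffWitness_maxmiumScore.1) (pvDiffWitness_maxmiumScore.2) = pvDiffWitnessOut_maxmiumScore.1 ∧ maxmiumScore_alt (pvDiffWitness_maxmiumScore.1) (pvDiffWitness_maxmiumScore.2) = pvDiffWitnessOut_maxmiumScore.2 ∧ pvDiffWitnessOut_maxmiumScore.1 ≠ pvDiffWitnessOut_maxmiumScore.2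

-- ===== LEMMAS AND PROOFS =====

-- adjacent disjoint pair sums; both programs' pair lists are characterised by it
def pairL : List Int → List Int
  | a :: b :: t => (a + b) :: pairL t
  | _ => []

theorem pairL_nil : pairL [] = [] := rfl
theorem pairL_single (a : Int) : pairL [a] = [] := rfl
theorem pairL_cons (a b : Int) (t : List Int) : pairL (a :: b :: t) = (a + b) :: pairL t := rfl

theorem length_pairL : ∀ l : List Int, (pairL l).length = l.length / 2
  | [] => rfl
  | [a] => by simp [pairL_single]
  | a :: b :: t => by
    rw [pairL_cons]
    simp only [List.length_cons, length_pairL t]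
    omega

theorem pairL_drop_two : ∀ l : List Int, pairL (l.drop 2) = (pairL l).drop 1
  | [] => rfl
  | [_] => rfl
  | _ :: _ :: t => by simp [pairL_cons]

theorem pairL_drop : ∀ (a : Nat) (l : List Int), pairL (l.drop (2 * a)) = (pairL l).drop a
  | 0, l => by simp
  | (a+1), l => by
    have h1 : l.drop (2 * (a + 1)) = (l.drop 2).drop (2 * a) := by
      rw [List.drop_drop]; ring_nf
    rw [h1, pairL_drop a, pairL_drop_two, List.drop_drop]
    ring_nf

theorem pairL_getD : ∀ (a : Nat) (l : List Int), a < (pairL l).length →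
    (pairL l).getD a 0 = l.getD (2 * a) 0 + l.getD (2 * a + 1) 0
  | _, [], h => by simp [pairL_nil] at h
  | _, [x], h => by simp [pairL_single] at h
  | 0, a :: b :: t, h => by simp [pairL_cons]
  | (k+1), a :: b :: t, h => by
    rw [pairL_cons] at h ⊢
    simp only [List.length_cons] at h
    have ih := pairL_getD k t (by omega)
    simp only [List.getD_cons_succ, show 2*(k+1) = (2*k+1)+1 by ring]
    simpa [List.getD_cons_succ] using ih

theorem sum_take_two_mul : ∀ (m : Nat) (l : List Int), 2 * m ≤ l.length →
    (l.take (2 * m)).sum = ((pairL l).take m).sum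
  | 0, l, _ => by simp
  | (m+1), l, h => by
    match l with
    | a :: b :: t =>
      have ih := sum_take_two_mul m t (by simp at h; omega)
      rw [pairL_cons]
      simp only [show 2*(m+1) = (2*m)+1+1 by ring, List.take_succ_cons, List.sum_cons, ih]
      ring
    | [] => simp at h
    | [a] => simp at h; omega

theorem mem_pairL : ∀ (u : List Int), ∀ y ∈ pairL u, ∃ c ∈ u, ∃ d ∈ u, y = c + d
  | a :: b :: t, y, hy => by
    rw [pairL_cons, List.mem_cons] at hy
    rcases hy with hy | hy
    · exact ⟨a, by simp, b, by simp, hy⟩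
    · obtain ⟨c, hc, d, hd, rfl⟩ := mem_pairL t y hy
      exact ⟨c, by simp [hc], d, by simp [hd], rfl⟩
  | [], y, hy => by simp [pairL_nil] at hy
  | [a], y, hy => by simp [pairL_single] at hy

theorem pairL_pairwise : ∀ l : List Int, l.Pairwise (fun a b => b ≤ a) →
    (pairL l).Pairwise (fun a b => b ≤ a)
  | [], _ => by simp [pairL_nil]
  | [a], _ => by simp [pairL_single]
  | a :: b :: t, h => by
    rw [pairL_cons]
    rw [List.pairwise_cons] at h
    obtain ⟨ha, h2⟩ := h
    rw [List.pairwise_cons] at h2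
    obtain ⟨hb, ht⟩ := h2
    refine List.pairwise_cons.2 ⟨?_, pairL_pairwise t ht⟩
    intro x hx
    obtain ⟨c, hc, d, hd, rfl⟩ := mem_pairL t x hx
    have h1 : c ≤ a := ha c (by simp [hc])
    have h2 : d ≤ b := hb d hd
    omega

-- the structural content of A's merge loop plus its tail
def mrg : List Int → List Int → Nat → Option Int
  | _, _, 0 => some 0
  | [], O, m => if m ≤ O.length then some ((O.take m).sum) else none
  | E, [], m => if m ≤ E.length then some ((E.take m).sum) else none
  | e :: E, o :: O, (m+1) =>
    if e ≤ o then (mrg (e :: E) O m).map (fun s => o + s)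
    else (mrg E (o :: O) m).map (fun s => e + s)

def sortD (l : List Int) : List Int := PySem.List.sorted l (fun x => x) true

theorem desc_unique {l1 l2 : List Int} (hp : l1.Perm l2)
    (h1 : l1.Pairwise (fun a b => b ≤ a)) (h2 : l2.Pairwise (fun a b => b ≤ a)) : l1 = l2 :=
  List.Perm.eq_of_pairwise (fun _ _ _ _ hab hba => le_antisymm hba hab) h1 h2 hp

theorem sortD_pairwise (l : List Int) : (sortD l).Pairwise (fun a b => b ≤ a) := by
  simpa using PySem.List.sorted_pairwise_rev l (fun x => x)

theorem sortD_perm (l : List Int) : (sortD l).Perm l := PySem.List.sorted_perm l (fun x => x) true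

theorem sortD_eq_self {l : List Int} (h : l.Pairwise (fun a b => b ≤ a)) : sortD l = l :=
  desc_unique (sortD_perm l) (sortD_pairwise l) h

theorem sortD_pick (o : Int) (l1 l2 : List Int) (h : ∀ x ∈ l1 ++ l2, x ≤ o) :
    sortD (l1 ++ o :: l2) = o :: sortD (l1 ++ l2) := by
  refine desc_unique ?_ (sortD_pairwise _) ?_
  · exact ((sortD_perm _).trans List.perm_middle).trans ((sortD_perm (l1 ++ l2)).symm.cons o)
  · exact List.pairwise_cons.2 ⟨fun x hx => h x ((sortD_perm (l1 ++ l2)).mem_iff.1 hx), sortD_pairwise _⟩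

-- greedy merge of two descending lists takes the m largest elements of their union
theorem mrg_eq : ∀ (m : Nat) (E O : List Int),
    E.Pairwise (fun a b => b ≤ a) → O.Pairwise (fun a b => b ≤ a) →
    mrg E O m = if m ≤ E.length + O.length then some (((sortD (E ++ O)).take m).sum) else none
  | 0, E, O, _, _ => by simp [mrg]
  | (m+1), [], O, _, hO => by
    rw [show mrg [] O (m+1) = if m+1 ≤ O.length then some ((O.take (m+1)).sum) else none from rfl]
    simp [sortD_eq_self hO]
  | (m+1), (e :: E), [], hE, _ => by
    rw [show mrg (e :: E) [] (m+1) = if m+1 ≤ (e::E).length then some (((e::E).take (m+1)).sum) else none from rfl]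
    simp [sortD_eq_self hE]
  | (m+1), (e :: E), (o :: O), hE, hO => by
    rw [show mrg (e :: E) (o :: O) (m+1) =
      (if e ≤ o then (mrg (e :: E) O m).map (fun s => o + s)
       else (mrg E (o :: O) m).map (fun s => e + s)) from rfl]
    have hE' := (List.pairwise_cons.1 hE).2
    have hEh := (List.pairwise_cons.1 hE).1
    have hO' := (List.pairwise_cons.1 hO).2
    have hOh := (List.pairwise_cons.1 hO).1
    by_cases hcmp : e ≤ o
    · rw [if_pos hcmp, mrg_eq m (e :: E) O hE hO']
      have hpick : sortD ((e :: E) ++ o :: O) = o :: sortD ((e :: E) ++ O) := by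
        apply sortD_pick
        intro x hx
        rcases List.mem_append.1 hx with hx | hx
        · rcases List.mem_cons.1 hx with rfl | hx
          · exact hcmp
          · exact le_trans (hEh x hx) hcmp
        · exact hOh x hx
      rw [hpick]
      by_cases hlen : m ≤ (e :: E).length + O.length
      · rw [if_pos hlen, if_pos (by simp at hlen ⊢; omega)]
        simp
      · rw [if_neg hlen, if_neg (by simp at hlen ⊢; omega)]
        simp
    · rw [if_neg hcmp, mrg_eq m E (o :: O) hE' hO]
      have hpick : sortD ((e :: E) ++ o :: O) = e :: sortD (E ++ o :: O) := by
        have := sortD_pick e [] (E ++ o :: O) (by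
          intro x hx
          simp only [List.nil_append] at hx
          rcases List.mem_append.1 hx with hx | hx
          · exact hEh x hx
          · rcases List.mem_cons.1 hx with rfl | hx
            · omega
            · have := hOh x hx; omega)
        simpa using this
      rw [hpick]
      by_cases hlen : m ≤ E.length + (o :: O).length
      · rw [if_pos hlen, if_pos (by simp at hlen ⊢; omega)]
        simp
      · rw [if_neg hlen, if_neg (by simp at hlen ⊢; omega)]
        simp

theorem core_pairs : ∀ l : List Int,
    (List.range (l.length / 2)).map (fun k => l.getD (2*k) 0 + l.getD (2*k+1) 0) = pairL l
  | [] => by simp [pairL]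
  | [a] => by simp [pairL]
  | a :: b :: t => by
    have hlen : (a :: b :: t).length / 2 = t.length / 2 + 1 := by simp; omega
    rw [hlen, List.range_succ_eq_map]
    rw [show pairL (a :: b :: t) = (a + b) :: pairL t from rfl, List.map_cons, List.map_map]
    refine congrArg₂ List.cons (by simp) ?_
    rw [← core_pairs t]
    apply List.map_congr_left
    intro k _
    simp only [Function.comp_apply, Nat.succ_eq_add_one]
    have h1 : 2 * (k+1) = ((2*k)+1)+1 := by ring
    rw [h1]
    simp

-- A's pair construction: foldl over range(1, len, 2) indexing (i-1, i)
theorem aPairs_eq (l : List Int) :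
    (PySem.List.pyRange 1 (l.length : Int) 2).foldl
      (fun acc i => acc ++ [PySem.List.pyGetD l (i - 1) 0 + PySem.List.pyGetD l i 0]) [] = pairL l := by
  rw [PySem.List.foldl_append_singleton_eq_map]
  rw [PySem.List.pyRange_of_pos 1 (l.length : Int) (by omega)]
  have hcount : (if (1:Int) < (l.length : Int) then (((l.length : Int) - 1 + 2 - 1) / 2).toNat else 0) = l.length / 2 := by
    split
    · omega
    · omega
  rw [hcount, List.nil_append, List.map_map, ← core_pairs l]
  apply List.map_congr_left
  intro k _
  simp only [Function.comp_apply]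
  have e1 : (1 : Int) + 2 * (k : Int) - 1 = ((2*k : Nat) : Int) := by push_cast; ring
  have e2 : (1 : Int) + 2 * (k : Int) = ((2*k+1 : Nat) : Int) := by push_cast; ring
  rw [e1, e2, PySem.List.pyGetD_natCast, PySem.List.pyGetD_natCast]

-- B's pair construction: map over range(0, len-1, 2) indexing (k, k+1)
theorem bPairs_eq (l : List Int) :
    (PySem.List.pyRange 0 ((l.length : Int) - 1) 2).map
      (fun k => PySem.List.pyGetD l k 0 + PySem.List.pyGetD l (k + 1) 0) = pairL l := by
  rw [PySem.List.pyRange_of_pos 0 ((l.length : Int) - 1) (by omega)]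
  have hcount : (if (0:Int) < (l.length : Int) - 1 then (((l.length : Int) - 1 - 0 + 2 - 1) / 2).toNat else 0) = l.length / 2 := by
    split
    · omega
    · have : l.length ≤ 1 := by omega
      omega
  rw [hcount, List.map_map, ← core_pairs l]
  apply List.map_congr_left
  intro k _
  simp only [Function.comp_apply]
  have e1 : (0 : Int) + 2 * (k : Int) = ((2*k : Nat) : Int) := by push_cast; ring
  have e2 : (0 : Int) + 2 * (k : Int) + 1 = ((2*k+1 : Nat) : Int) := by push_cast; ring
  rw [e2, e1, PySem.List.pyGetD_natCast, PySem.List.pyGetD_natCast]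

-- `del odds[-1]` on an odd-length list does not change the pairs
theorem pairL_dropLast_odd : ∀ l : List Int, l.length % 2 = 1 → pairL l.dropLast = pairL l
  | [], h => by simp at h
  | [a], _ => by simp [pairL]
  | a :: b :: t, h => by
    have ht : t.length % 2 = 1 := by simp at h; omega
    have hne : t ≠ [] := by intro he; rw [he] at ht; simp at ht
    have hdl : (a :: b :: t).dropLast = a :: b :: t.dropLast := by
      simp [List.dropLast_cons_of_ne_nil, hne]
    rw [hdl]
    rw [show pairL (a :: b :: t.dropLast) = (a+b) :: pairL t.dropLast from rfl,
        show pairL (a :: b :: t) = (a+b) :: pairL t from rfl,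
        pairL_dropLast_odd t ht]

-- parity test `1 == 1 & x` is `x % 2 == 1`
theorem odd_iff (c : Int) : (1 = PySem.Int.band 1 c) ↔ PySem.Int.mod c 2 = 1 := by
  rw [PySem.Int.band_comm, PySem.Int.band_one]
  exact eq_comm

-- A's partition loop = two filters
theorem part_eq : ∀ (cs o e : List Int),
    cs.foldl (fun (p : List Int × List Int) card =>
      if 1 = PySem.Int.band 1 card then (p.1 ++ [card], p.2) else (p.1, p.2 ++ [card])) (o, e)
    = (o ++ cs.filter (fun c => ¬ PySem.Int.mod c 2 = 0), e ++ cs.filter (fun c => PySem.Int.mod c 2 = 0))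
  | [], o, e => by simp
  | c :: cs, o, e => by
    rw [List.foldl_cons]
    have hmod := PySem.Int.mod_two_eq c
    by_cases hc : PySem.Int.mod c 2 = 0
    · have hdvd : (2:Int) ∣ c := (PySem.Int.mod_eq_zero_iff_dvd c 2).1 hc
      rw [if_neg (by rw [odd_iff]; omega)]
      rw [part_eq cs o (e ++ [c])]
      simp [hdvd]
    · have hc1 : c % 2 = 1 := by
        rw [← PySem.Int.mod_eq_emod_of_pos (by omega : (0:Int) < 2)]
        omega
      rw [if_pos (by rw [odd_iff]; omega)]
      rw [part_eq cs (o ++ [c]) e]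
      simp [hc1]

-- A's loop-plus-tail over index state = structural merge over the suffix lists
theorem bridge : ∀ (m a b : Nat) (eves odds : List Int) (ans : Int),
    2 * a ≤ eves.length → b ≤ odds.length →
    pvATail eves odds (pvALoop eves odds ans (2*(a:Int)+1) (b:Int) (2*(m:Int))) =
      (match mrg ((pairL eves).drop a) (odds.drop b) m with
       | some s => ans + s
       | none => 0) := by
  intro m
  induction m with
  | zero =>
    intro a b eves odds ans _ _
    rw [pvALoop]
    rw [dif_neg (by omega)]
    simp [pvATail, mrg]
  | succ m ih =>
    intro a b eves odds ans ha hb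
    by_cases hrun : b < odds.length ∧ 2*a+1 < eves.length
    · obtain ⟨hbo, hae⟩ := hrun
      have haP : a < (pairL eves).length := by rw [length_pairL]; omega
      have hE : (pairL eves).drop a = (pairL eves).getD a 0 :: (pairL eves).drop (a+1) := by
        rw [List.getD_eq_getElem _ _ haP, List.drop_eq_getElem_cons haP]
      have hO : odds.drop b = odds.getD b 0 :: odds.drop (b+1) := by
        rw [List.getD_eq_getElem _ _ hbo, List.drop_eq_getElem_cons hbo]
      have he1 : PySem.List.pyGetD eves (2*(a:Int)+1-1) 0 = eves.getD (2*a) 0 := by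
        rw [show 2*(a:Int)+1-1 = ((2*a : Nat) : Int) by push_cast; ring, PySem.List.pyGetD_natCast]
      have he2 : PySem.List.pyGetD eves (2*(a:Int)+1) 0 = eves.getD (2*a+1) 0 := by
        rw [show 2*(a:Int)+1 = ((2*a+1 : Nat) : Int) by push_cast; ring, PySem.List.pyGetD_natCast]
      have ho1 : PySem.List.pyGetD odds ((b:Int)) 0 = odds.getD b 0 := PySem.List.pyGetD_natCast ..
      have hpg : eves.getD (2*a) 0 + eves.getD (2*a+1) 0 = (pairL eves).getD a 0 :=
        (pairL_getD a eves haP).symm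
      rw [pvALoop, dif_pos (by push_cast; omega)]
      rw [he1, he2, ho1, hpg]
      by_cases hcmp : (pairL eves).getD a 0 ≤ odds.getD b 0
      · rw [if_pos hcmp]
        have harg1 : (b:Int) + 1 = ((b+1 : Nat) : Int) := by push_cast; ring
        have harg2 : 2*((m+1:Nat):Int) - 2 = 2*((m:Nat):Int) := by push_cast; ring
        rw [harg1, harg2, ih a (b+1) eves odds (ans + odds.getD b 0) ha (by omega)]
        rw [hE, hO]
        rw [show mrg ((pairL eves).getD a 0 :: (pairL eves).drop (a+1)) (odds.getD b 0 :: odds.drop (b+1)) (m+1)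
            = if (pairL eves).getD a 0 ≤ odds.getD b 0
              then (mrg ((pairL eves).getD a 0 :: (pairL eves).drop (a+1)) (odds.drop (b+1)) m).map (fun s => odds.getD b 0 + s)
              else (mrg ((pairL eves).drop (a+1)) (odds.getD b 0 :: odds.drop (b+1)) m).map (fun s => (pairL eves).getD a 0 + s) from rfl]
        rw [if_pos hcmp, ← hE]
        cases mrg ((pairL eves).drop a) (odds.drop (b+1)) m with
        | none => simp
        | some s => simp; ring
      · rw [if_neg hcmp]
        have harg1 : 2*(a:Int)+1+2 = 2*((a+1:Nat):Int)+1 := by push_cast; ring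
        have harg2 : 2*((m+1:Nat):Int) - 2 = 2*((m:Nat):Int) := by push_cast; ring
        rw [harg1, harg2, ih (a+1) b eves odds (ans + (pairL eves).getD a 0) (by omega) hb]
        rw [hE, hO]
        rw [show mrg ((pairL eves).getD a 0 :: (pairL eves).drop (a+1)) (odds.getD b 0 :: odds.drop (b+1)) (m+1)
            = if (pairL eves).getD a 0 ≤ odds.getD b 0
              then (mrg ((pairL eves).getD a 0 :: (pairL eves).drop (a+1)) (odds.drop (b+1)) m).map (fun s => odds.getD b 0 + s)
              else (mrg ((pairL eves).drop (a+1)) (odds.getD b 0 :: odds.drop (b+1)) m).map (fun s => (pairL eves).getD a 0 + s) from rfl]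
        rw [if_neg hcmp, ← hO]
        cases mrg ((pairL eves).drop (a+1)) (odds.drop b) m with
        | none => simp
        | some s => simp; ring
    · rw [pvALoop, dif_neg (by omega)]
      unfold pvATail
      simp only []
      have hcnt : (0:Int) < 2*((m+1:Nat):Int) := by push_cast; omega
      rw [if_pos hcnt]
      by_cases hjo : b = odds.length
      · subst hjo
        rw [if_pos (by ring_nf)]
        have hOnil : odds.drop odds.length = [] := by simp
        rw [hOnil]
        by_cases hEempty : (pairL eves).drop a = []
        · rw [hEempty]
          have hlen : eves.length / 2 ≤ a := by
            have := List.drop_eq_nil_iff.1 hEempty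
            rw [length_pairL] at this
            omega
          rw [show mrg [] [] (m+1) = if m+1 ≤ ([]:List Int).length then some ((([]:List Int).take (m+1)).sum) else none from rfl]
          rw [if_neg (show ¬ (m+1 ≤ ([]:List Int).length) by simp)]
          rw [if_neg (show ¬ (2*(a:Int)+1-1 + 2*((m+1:Nat):Int) ≤ (eves.length:Int)) by push_cast; omega)]
        · obtain ⟨e, E', hEcons⟩ := List.exists_cons_of_ne_nil hEempty
          rw [hEcons]
          rw [show mrg (e :: E') [] (m+1) = if m+1 ≤ (e::E').length then some (((e::E').take (m+1)).sum) else none from rfl]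
          have hlenE : (e::E').length = eves.length/2 - a := by
            rw [← hEcons, List.length_drop, length_pairL]
          by_cases hfit : 2*(a:Int)+1-1 + 2*((m+1:Nat):Int) ≤ (eves.length:Int)
          · rw [if_pos hfit, if_pos (by rw [hlenE]; push_cast at hfit ⊢; omega)]
            have hslice : PySem.List.slice eves (some (2*(a:Int)+1-1)) (some (2*(a:Int)+1-1 + 2*((m+1:Nat):Int)))
                = (eves.drop (2*a)).take (2*(m+1)) := by
              rw [show 2*(a:Int)+1-1 = ((2*a:Nat):Int) by push_cast; ring,
                  show ((2*a:Nat):Int) + 2*((m+1:Nat):Int) = ((2*a:Nat):Int) + ((2*(m+1):Nat):Int) by push_cast; ring]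
              exact PySem.List.slice_natCast_add ..
            rw [hslice]
            rw [sum_take_two_mul (m+1) (eves.drop (2*a)) (by rw [List.length_drop]; push_cast at hfit; omega)]
            rw [pairL_drop a eves, hEcons]
          · rw [if_neg hfit, if_neg (by rw [hlenE]; push_cast at hfit ⊢; omega)]
      · have hbo : b < odds.length := by omega
        have hae : ¬ (2*a+1 < eves.length) := fun hc => hrun ⟨hbo, hc⟩
        have hEnil : (pairL eves).drop a = [] := by
          apply List.drop_eq_nil_iff.2
          rw [length_pairL]; omega
        rw [hEnil]
        rw [if_neg (by omega)]
        have hOcons : odds.drop b = odds.getD b 0 :: odds.drop (b+1) := by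
          rw [List.getD_eq_getElem _ _ hbo, List.drop_eq_getElem_cons hbo]
        have hhalf : PySem.Int.floordiv (2*((m+1:Nat):Int)) 2 = ((m+1:Nat):Int) := by
          rw [PySem.Int.floordiv_eq_ediv_of_pos (by omega)]
          omega
        rw [hhalf]
        have hmrg : mrg ([] : List Int) (odds.drop b) (m+1)
            = if m+1 ≤ (odds.drop b).length then some (((odds.drop b).take (m+1)).sum) else none := by
          rw [hOcons]; rfl
        rw [hmrg]
        by_cases hfit : (b:Int) + ((m+1:Nat):Int) ≤ (odds.length:Int)
        · rw [if_pos hfit, if_pos (by rw [List.length_drop]; push_cast at hfit ⊢; omega)]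
          rw [PySem.List.slice_natCast_add ..]
        · rw [if_neg hfit, if_neg (by rw [List.length_drop]; push_cast at hfit ⊢; omega)]

-- the final shape shared by both programs, in B's syntax
theorem finals (E O : List Int) (hE : E.Pairwise (fun a b => b ≤ a))
    (hO : O.Pairwise (fun a b => b ≤ a)) (m : Nat) (base : Int) :
    (match mrg E O m with | some s => base + s | none => 0)
    = if (((E ++ O).length : Nat) : Int) < ((m : Nat) : Int) then 0
      else base + (PySem.List.slice (PySem.List.sorted (E ++ O) (fun x => x) true) none (some ((m : Nat) : Int))).sum := by
  rw [mrg_eq m E O hE hO]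
  by_cases h : m ≤ E.length + O.length
  · rw [if_pos h]
    rw [if_neg (by rw [List.length_append]; push_cast; omega)]
    rw [show PySem.List.sorted (E ++ O) (fun x => x) true = sortD (E ++ O) from rfl]
    rw [PySem.List.slice_to_natCast]
  · rw [if_neg h]
    rw [if_pos (by rw [List.length_append]; push_cast; omega)]

-- the main equivalence, outside D_
theorem main_eq (cards : List Int) (cnt : Int) (hD : ¬ D_maxmiumScore cards cnt) :
    maxmiumScore cards cnt = maxmiumScore_alt cards cnt := by
  simp only [maxmiumScore, maxmiumScore_alt]
  rw [part_eq]
  simp only [List.nil_append]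
  set cs := PySem.List.sorted cards (fun x => x) true with hcs_def
  set odds0 := cs.filter (fun c => ¬ PySem.Int.mod c 2 = 0) with hodds0
  set eves := cs.filter (fun c => PySem.Int.mod c 2 = 0) with heves
  have hdesc_cs : cs.Pairwise (fun a b => b ≤ a) := by
    simpa using PySem.List.sorted_pairwise_rev cards (fun x => x)
  have hdescO : odds0.Pairwise (fun a b => b ≤ a) := hdesc_cs.filter _
  have hdescE : eves.Pairwise (fun a b => b ≤ a) := hdesc_cs.filter _
  -- A's pair list is pairL odds0
  have hApairs : (PySem.List.pyRange 1
      (((if 1 = PySem.Int.band 1 ((odds0.length : Nat) : Int) then odds0.dropLast else odds0).length : Nat) : Int) 2).foldl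
      (fun acc i => acc ++ [PySem.List.pyGetD (if 1 = PySem.Int.band 1 ((odds0.length : Nat) : Int) then odds0.dropLast else odds0) (i - 1) 0
        + PySem.List.pyGetD (if 1 = PySem.Int.band 1 ((odds0.length : Nat) : Int) then odds0.dropLast else odds0) i 0]) []
      = pairL odds0 := by
    rw [aPairs_eq]
    by_cases hodd : 1 = PySem.Int.band 1 ((odds0.length : Nat) : Int)
    · rw [if_pos hodd]
      rw [odd_iff] at hodd
      have h2 : PySem.Int.mod ((odds0.length : Nat) : Int) 2 = ((odds0.length % 2 : Nat) : Int) := by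
        exact_mod_cast PySem.Int.mod_natCast odds0.length 2
      rw [h2] at hodd
      apply pairL_dropLast_odd
      exact_mod_cast hodd
    · rw [if_neg hodd]
  rw [hApairs]
  simp only [odd_iff]
  by_cases hneg : cnt < 0
  · rw [if_pos hneg]
    by_cases hpar : PySem.Int.mod cnt 2 = 1
    · rw [if_pos hpar]
      have hEnil : eves = [] := by
        by_contra hne
        obtain ⟨x, hx⟩ := List.exists_mem_of_ne_nil _ hne
        have hxval : PySem.Int.mod x 2 = 0 := by
          have := List.of_mem_filter hx
          simpa using this
        have hxcards : x ∈ cards := by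
          have := List.mem_of_mem_filter hx
          rw [hcs_def] at this
          exact (PySem.List.mem_sorted cards (fun x => x) true x).1 this
        exact hD ⟨hneg, hpar, x, hxcards, hxval⟩
      rw [if_pos (by rw [hEnil]; simp)]
    · rw [if_neg hpar]
      rw [pvALoop, dif_neg (by omega)]
      unfold pvATail
      simp only []
      rw [if_neg (by omega)]
  · rw [if_neg hneg]
    by_cases hpar : PySem.Int.mod cnt 2 = 1
    · rw [if_pos hpar, if_pos hpar]
      by_cases hEnil : eves = []
      · rw [if_pos (by rw [hEnil]; simp), if_pos hEnil]
      · rw [if_neg (by intro hc; exact hEnil (by simpa using List.eq_nil_of_length_eq_zero (by exact_mod_cast hc))),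
            if_neg hEnil]
        -- cnt is odd and ≥ 0, so cnt - 1 = 2m
        have hmod : cnt % 2 = 1 := by
          rw [← PySem.Int.mod_eq_emod_of_pos (by omega : (0:Int) < 2)]
          exact hpar
        obtain ⟨m, hm⟩ : ∃ m : Nat, cnt - 1 = 2 * (m : Int) := ⟨((cnt-1)/2).toNat, by omega⟩
        dsimp only
        have hb := bridge m 0 0 (eves.drop 1) (pairL odds0) (PySem.List.pyGetD eves 0 0)
          (by omega) (by omega)
        simp only [Nat.cast_zero, mul_zero, zero_add, List.drop_zero] at hb
        simp only [zero_add]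
        rw [hm, hb]
        have hk : PySem.Int.floordiv (2 * ((m : Nat) : Int)) 2 = ((m : Nat) : Int) := by
          rw [PySem.Int.floordiv_eq_ediv_of_pos (by omega)]
          omega
        rw [hk, bPairs_eq (eves.drop 1), bPairs_eq odds0]
        rw [finals (pairL (eves.drop 1)) (pairL odds0)
          (pairL_pairwise _ (hdescE.drop)) (pairL_pairwise _ hdescO) m (PySem.List.pyGetD eves 0 0)]
    · rw [if_neg hpar, if_neg hpar]
      have hmod : cnt % 2 = 0 := by
        have h2 := PySem.Int.mod_two_eq cnt
        rw [← PySem.Int.mod_eq_emod_of_pos (by omega : (0:Int) < 2)]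
        omega
      obtain ⟨m, hm⟩ : ∃ m : Nat, cnt = 2 * (m : Int) := ⟨(cnt/2).toNat, by omega⟩
      dsimp only
      have hb := bridge m 0 0 eves (pairL odds0) 0 (by omega) (by omega)
      simp only [Nat.cast_zero, mul_zero, zero_add, List.drop_zero] at hb
      rw [hm, hb]
      have hk : PySem.Int.floordiv (2*((m:Nat):Int)) 2 = ((m : Nat) : Int) := by
        rw [PySem.Int.floordiv_eq_ediv_of_pos (by omega)]
        omega
      rw [hk, bPairs_eq eves, bPairs_eq odds0]
      have hf := finals (pairL eves) (pairL odds0)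
        (pairL_pairwise _ hdescE) (pairL_pairwise _ hdescO) m 0
      simp only [zero_add] at hf
      rw [hf]
      simp only [zero_add]

-- ===== VERDICT (by name: the statement is the Claim_ definition above) =====
theorem maxmiumScore_spec : Claim_unchanged_maxmiumScore := by
  intro cards cnt _ hD
  exact main_eq cards cnt hD

theorem maxmiumScore_changed : Claim_changed_maxmiumScore := by
  unfold Claim_changed_maxmiumScore
  refine ⟨by decide, by decide, ?_, by decide, by decide⟩
  show maxmiumScore [2] (-1) = 2
  simp only [maxmiumScore]
  rw [show PySem.List.sorted ([2]:List Int) (fun x => x) true = [2] from by decide]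
  rw [part_eq]
  simp only [List.nil_append]
  rw [show ([2]:List Int).filter (fun c => ¬ PySem.Int.mod c 2 = 0) = [] from by decide,
      show ([2]:List Int).filter (fun c => PySem.Int.mod c 2 = 0) = [2] from by decide]
  rw [if_neg (show ¬ (1 = PySem.Int.band 1 ((([]:List Int).length : Nat) : Int)) from by decide)]
  rw [show PySem.List.pyRange 1 ((([]:List Int).length : Nat) : Int) 2 = [] from by decide]
  rw [List.foldl_nil]
  rw [if_pos (show (1 = PySem.Int.band 1 (-1)) from by decide)]
  rw [if_neg (show ¬ (((([2]:List Int).length : Nat) : Int) = 0) from by decide)]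
  rw [show ([2]:List Int).drop 1 = [] from rfl,
      show (0 + PySem.List.pyGetD ([2]:List Int) 0 0) = 2 from by decide,
      show (-1:Int) - 1 = -2 from by norm_num]
  rw [pvALoop, dif_neg (by omega)]
  unfold pvATail
  norm_num
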